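-- pv_equiv track=rewrite | github.com/lelouchijk/Python-Exercise | firstTest.py | function6
-- ===== SOURCE A (Python) =====
-- def function6(x : int)->int:
--     total = 0
--     for i in range(x+1):
--         if (i%2==0):
--             total +=i
--         if (i == 7):
--             total += i
--     return total
-- ===== SOURCE B (Python) =====
-- def function6(x: int) -> int:
--     if x < 0:
--         return 0
--     m = x // 2
--     return m * (m + 1) + (7 if x >= 7 else 0)
-- ===== Notes on version B (the rewrite author's own statement) =====
-- stated objective: faster
-- what changed: Replaces the O(x) loop over range(x+1) with the closed form m*(m+1) for the sum of evens up to x (m = x//2), plus 7 when x >= 7.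
import Mathlib
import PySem

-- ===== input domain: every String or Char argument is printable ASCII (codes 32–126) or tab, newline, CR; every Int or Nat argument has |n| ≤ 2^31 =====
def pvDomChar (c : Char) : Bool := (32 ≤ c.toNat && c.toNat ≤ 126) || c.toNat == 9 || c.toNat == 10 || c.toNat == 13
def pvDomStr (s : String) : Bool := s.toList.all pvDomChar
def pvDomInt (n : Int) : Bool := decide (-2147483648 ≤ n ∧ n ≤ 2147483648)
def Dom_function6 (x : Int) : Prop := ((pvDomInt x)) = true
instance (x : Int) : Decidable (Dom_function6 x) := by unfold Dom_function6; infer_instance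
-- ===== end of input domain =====

-- B replaces A's O(x) loop with the closed form m*(m+1), m = x//2, plus 7 when x >= 7 (faster).

-- ===== PORT A =====
def function6 (x : Int) : Int :=
  (PySem.List.pyRange 0 (x + 1) 1).foldl
    (fun total i =>
      let total := if PySem.Int.mod i 2 = 0 then total + i else total
      if i = 7 then total + i else total) 0

-- ===== PORT B =====
def function6_alt (x : Int) : Int :=
  if x < 0 then 0
  else
    let m := PySem.Int.floordiv x 2
    m * (m + 1) + (if x ≥ 7 then 7 else 0)

-- ===== PRECONDITION & SPEC =====
def Spec_function6 (x : Int) (out : Int) : Prop := out = function6_alt x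
instance (x : Int) (out : Int) : Decidable (Spec_function6 x out) := by unfold Spec_function6; infer_instance

-- ===== CLAIM (what is proved, stated in full; the proofs are below) =====
def Claim_equal_function6 : Prop := ∀ (x : Int), Dom_function6 x → Spec_function6 x (function6 x)

-- ===== LEMMAS AND PROOFS =====

-- the loop's step function, named for the proofs
def pvStep : Int → Int → Int := fun total i =>
  let total := if PySem.Int.mod i 2 = 0 then total + i else total
  if i = 7 then total + i else total

theorem pvStep_eq (t i : Int) :
    pvStep t i = t + (if PySem.Int.mod i 2 = 0 then i else 0) + (if i = 7 then i else 0) := by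
  simp only [pvStep]
  split_ifs <;> omega

-- A's loop on 0..n computes the closed form, by induction on n
theorem pvLoop_closed (n : Nat) :
    (PySem.List.pyRange 0 ((n : Int) + 1) 1).foldl pvStep 0 =
      (PySem.Int.floordiv (n : Int) 2) * (PySem.Int.floordiv (n : Int) 2 + 1)
        + (if (n : Int) ≥ 7 then 7 else 0) := by
  induction n with
  | zero => decide
  | succ k ih =>
    have h : (((k : Nat) + 1 : Nat) : Int) + 1 = ((k : Int) + 1) + 1 := by push_cast; ring
    rw [h, PySem.List.pyRange_one_succ_right (by positivity), List.foldl_append]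
    simp only [List.foldl, ih, pvStep_eq]
    have hd : ∀ m : Nat, PySem.Int.floordiv (m : Int) 2 = ((m / 2 : Nat) : Int) := by
      intro m; exact_mod_cast PySem.Int.floordiv_natCast m 2
    have hm : ∀ m : Nat, PySem.Int.mod (m : Int) 2 = ((m % 2 : Nat) : Int) := by
      intro m; exact_mod_cast PySem.Int.mod_natCast m 2
    have h1 : ((k : Int) + 1) = (((k + 1 : Nat) : Nat) : Int) := by push_cast; ring
    rw [hd k, h1, hd (k + 1), hm (k + 1)]
    rcases Nat.mod_two_eq_zero_or_one (k + 1) with h2 | h2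
    · -- k+1 even: the new quotient is the old one plus 1
      have hdiv : (k + 1) / 2 = k / 2 + 1 := by omega
      rw [h2, hdiv]
      push_cast
      have hprod : ((k / 2 : Nat) : Int) * ((k / 2 : Nat) + 1) + 2 * ((k / 2 : Nat) + 1)
          = (((k / 2 : Nat) : Int) + 1) * (((k / 2 : Nat) : Int) + 1 + 1) := by ring
      have hrel : (k : Int) + 1 = 2 * ((k : Int) / 2 + 1) := by omega
      split_ifs with ha hb hb <;> push_cast at * <;>
        first
        | (exfalso; omega)
        | linarith [hprod, hrel]
    · -- k+1 odd: the quotient is unchanged and k+1 is not even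
      have hdiv : (k + 1) / 2 = k / 2 := by omega
      rw [h2, hdiv]
      push_cast
      split_ifs with ha hb hb <;> push_cast at * <;>
        first
        | (exfalso; omega)
        | linarith

theorem function6_closed (x : Int) (hx : 0 ≤ x) :
    function6 x = (PySem.Int.floordiv x 2) * (PySem.Int.floordiv x 2 + 1)
        + (if x ≥ 7 then 7 else 0) := by
  obtain ⟨n, rfl⟩ := Int.eq_ofNat_of_zero_le hx
  exact pvLoop_closed n

-- ===== VERDICT (by name: the statement is the Claim_ definition above) =====
theorem function6_spec : Claim_equal_function6 := by
  intro x _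
  unfold Spec_function6 function6_alt
  by_cases hx : x < 0
  · simp only [hx, if_true]
    unfold function6
    rw [PySem.List.pyRange_one_eq_nil (by omega)]
    rfl
  · simp only [hx, if_false]
    exact function6_closed x (by omega)
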